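-- pv_equiv track=rewrite | github.com/albertz/helpers | fnmatchex.py | fnpattern_to_re
-- ===== SOURCE A (Python) =====
-- def fnpattern_to_re(pattern):
-- 	ret = ""
-- 	state = 0
-- 	for c in pattern:
-- 		if state == 0: # default
-- 			if c == "[": state = 1
-- 			elif c == ",": c = "|"
-- 			elif c == "|": c = "\\|"
-- 			elif c == "*": c = ".*"
-- 			elif c == "?": c = "."
-- 			elif c == ".": c = "\\."
-- 			elif c == "\\": state,oldstate = 2,0
-- 			elif c == "(": c = "\\("
-- 			elif c == ")": c = "\\)"
-- 			elif c == "{": c = "("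
-- 			elif c == "}": c = ")"
-- 			ret += c
-- 		elif state == 1: # in "[]"
-- 			if c == "]": state = 0
-- 			elif c == "\\": state,oldstate = 2,1
-- 			ret += c
-- 		elif state == 2: # \-escaped
-- 			ret += c
-- 			state = oldstate
-- 		else:
-- 			raise Exception("bad state: " + str(state))
-- 	return "^(" + ret + ")$"
-- ===== SOURCE B (Python) =====
-- _TRANS = {",": "|", "|": "\\|", "*": ".*", "?": ".", ".": "\\.",
--           "(": "\\(", ")": "\\)", "{": "(", "}": ")"}
--
-- def fnpattern_to_re(pattern):
--     out = []
--     i, n = 0, len(pattern)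
--     while i < n:
--         c = pattern[i]
--         if c == "\\":
--             out.append("\\")
--             if i + 1 < n:
--                 out.append(pattern[i + 1])
--             i += 2
--         elif c == "[":
--             out.append("[")
--             i += 1
--             while i < n:
--                 d = pattern[i]
--                 if d == "\\":
--                     out.append("\\")
--                     if i + 1 < n:
--                         out.append(pattern[i + 1])
--                     i += 2
--                 elif d == "]":
--                     out.append("]")
--                     i += 1
--                     break
--                 else:
--                     out.append(d)
--                     i += 1
--         else:
--             out.append(_TRANS.get(c, c))
--             i += 1
--     return "^(" + "".join(out) + ")$"
-- ===== Notes on version B (the rewrite author's own statement) =====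
-- stated objective: alternative
-- what changed: Replaced A's one-character-at-a-time state-machine (state variable 0/1/2 with a saved oldstate) by an explicit index-based scanner: a while loop that consumes backslash-escapes two characters at a time, a dedicated inner loop for bracketed character classes, and a translation map for the default case.
import Mathlib
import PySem

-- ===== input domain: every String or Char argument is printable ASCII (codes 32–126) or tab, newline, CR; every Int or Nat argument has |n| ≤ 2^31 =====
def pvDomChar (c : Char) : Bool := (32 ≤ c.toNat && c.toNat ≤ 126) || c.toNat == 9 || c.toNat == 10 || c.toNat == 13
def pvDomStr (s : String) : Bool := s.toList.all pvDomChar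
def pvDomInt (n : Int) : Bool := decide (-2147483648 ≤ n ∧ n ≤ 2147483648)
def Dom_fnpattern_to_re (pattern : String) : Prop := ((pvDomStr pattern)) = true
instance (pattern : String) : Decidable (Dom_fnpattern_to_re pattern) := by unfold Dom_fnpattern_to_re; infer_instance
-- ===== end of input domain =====

-- ===== PORT A =====
-- B rewrites A's one-state-variable scanner as an explicit two-mode scanner with a translation
-- map ("alternative" decomposition; same output, same cost).
-- A: state-machine fold over the characters (state 0 = default, 1 = inside "[]", 2 = after "\\").
-- The Python 'else: raise' branch is unreachable (state is always 0/1/2); ported as identity.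
def stepA : (List Char × Nat × Nat) → Char → (List Char × Nat × Nat)
  | (ret, state, old), c =>
    if state = 0 then
      if c = '[' then (ret ++ ['['], 1, old)
      else if c = ',' then (ret ++ ['|'], 0, old)
      else if c = '|' then (ret ++ ['\\', '|'], 0, old)
      else if c = '*' then (ret ++ ['.', '*'], 0, old)
      else if c = '?' then (ret ++ ['.'], 0, old)
      else if c = '.' then (ret ++ ['\\', '.'], 0, old)
      else if c = '\\' then (ret ++ ['\\'], 2, 0)
      else if c = '(' then (ret ++ ['\\', '('], 0, old)
      else if c = ')' then (ret ++ ['\\', ')'], 0, old)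
      else if c = '{' then (ret ++ ['('], 0, old)
      else if c = '}' then (ret ++ [')'], 0, old)
      else (ret ++ [c], 0, old)
    else if state = 1 then
      if c = ']' then (ret ++ [']'], 0, old)
      else if c = '\\' then (ret ++ ['\\'], 2, 1)
      else (ret ++ [c], 1, old)
    else if state = 2 then (ret ++ [c], old, old)
    else (ret, state, old)

def fnpattern_to_re (pattern : String) : String :=
  let r := pattern.toList.foldl stepA ([], 0, 0)
  String.mk ('^' :: '(' :: (r.1 ++ [')', '$']))

-- ===== PORT B =====
-- B: explicit scanner over the remaining characters (the index-based while loops of Source B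
-- rendered as structural recursion on the suffix), with the default translation map (_TRANS.get)
-- as a function.
def transB (c : Char) : List Char :=
  if c = ',' then ['|']
  else if c = '|' then ['\\', '|']
  else if c = '*' then ['.', '*']
  else if c = '?' then ['.']
  else if c = '.' then ['\\', '.']
  else if c = '(' then ['\\', '(']
  else if c = ')' then ['\\', ')']
  else if c = '{' then ['(']
  else if c = '}' then [')']
  else [c]

mutual
-- outer while loop of Source B
def goD : List Char → List Char
  | [] => []
  | c :: rest =>
    if c = '\\' then
      match rest with
      | [] => ['\\']
      | d :: r => '\\' :: d :: goD r
    else if c = '[' then '[' :: goC rest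
    else transB c ++ goD rest
  termination_by l => l.length
-- inner while loop of Source B (character-class mode)
def goC : List Char → List Char
  | [] => []
  | c :: rest =>
    if c = '\\' then
      match rest with
      | [] => ['\\']
      | d :: r => '\\' :: d :: goC r
    else if c = ']' then ']' :: goD rest
    else c :: goC rest
  termination_by l => l.length
end

def fnpattern_to_re_alt (pattern : String) : String :=
  String.mk ('^' :: '(' :: (goD pattern.toList ++ [')', '$']))

-- ===== PRECONDITION & SPEC =====
def Spec_fnpattern_to_re (pattern : String) (out : String) : Prop := out = fnpattern_to_re_alt pattern
instance (pattern : String) (out : String) : Decidable (Spec_fnpattern_to_re pattern out) := by unfold Spec_fnpattern_to_re; infer_instance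

-- ===== CLAIM (what is proved, stated in full; the proofs are below) =====
def Claim_equal_fnpattern_to_re : Prop := ∀ (pattern : String), Dom_fnpattern_to_re pattern → Spec_fnpattern_to_re pattern (fnpattern_to_re pattern)

-- ===== LEMMAS AND PROOFS =====

theorem stepA_br0 (ret : List Char) (o : Nat) : stepA (ret, 0, o) '[' = (ret ++ ['['], 1, o) := by
  simp [stepA]

theorem stepA_bs0 (ret : List Char) (o : Nat) : stepA (ret, 0, o) '\\' = (ret ++ ['\\'], 2, 0) := by
  simp [stepA]

theorem stepA_other0 (ret : List Char) (o : Nat) (c : Char) (h1 : c ≠ '[') (h2 : c ≠ '\\') :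
    stepA (ret, 0, o) c = (ret ++ transB c, 0, o) := by
  simp only [stepA, transB]
  simp [h1, h2]
  split_ifs <;> simp

theorem stepA_cl1 (ret : List Char) (o : Nat) : stepA (ret, 1, o) ']' = (ret ++ [']'], 0, o) := by
  simp [stepA]

theorem stepA_bs1 (ret : List Char) (o : Nat) : stepA (ret, 1, o) '\\' = (ret ++ ['\\'], 2, 1) := by
  simp [stepA]

theorem stepA_other1 (ret : List Char) (o : Nat) (c : Char) (h1 : c ≠ ']') (h2 : c ≠ '\\') :
    stepA (ret, 1, o) c = (ret ++ [c], 1, o) := by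
  simp [stepA, h1, h2]

theorem stepA_esc (ret : List Char) (o : Nat) (c : Char) : stepA (ret, 2, o) c = (ret ++ [c], o, o) := by
  simp [stepA]

theorem goD_nil : goD [] = [] := by rw [goD.eq_def]

theorem goD_bs_nil : goD ['\\'] = ['\\'] := by rw [goD.eq_def]; simp

theorem goD_bs_cons (d : Char) (r : List Char) : goD ('\\' :: d :: r) = '\\' :: d :: goD r := by
  rw [goD.eq_def]; simp

theorem goD_br (rest : List Char) : goD ('[' :: rest) = '[' :: goC rest := by
  rw [goD.eq_def]; simp

theorem goD_other (c : Char) (rest : List Char) (h1 : c ≠ '\\') (h2 : c ≠ '[') :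
    goD (c :: rest) = transB c ++ goD rest := by
  rw [goD.eq_def]; simp [h1, h2]

theorem goC_nil : goC [] = [] := by rw [goC.eq_def]

theorem goC_bs_nil : goC ['\\'] = ['\\'] := by rw [goC.eq_def]; simp

theorem goC_bs_cons (d : Char) (r : List Char) : goC ('\\' :: d :: r) = '\\' :: d :: goC r := by
  rw [goC.eq_def]; simp

theorem goC_cl (rest : List Char) : goC (']' :: rest) = ']' :: goD rest := by
  rw [goC.eq_def]; simp

theorem goC_other (c : Char) (rest : List Char) (h1 : c ≠ '\\') (h2 : c ≠ ']') :
    goC (c :: rest) = c :: goC rest := by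
  rw [goC.eq_def]; simp [h1, h2]

-- The fold from state 0 produces goD and the fold from state 1 produces goC (first components),
-- for any accumulated prefix and any oldstate; strong induction on the length of the suffix.
theorem key : ∀ (n : Nat) (l : List Char), l.length ≤ n →
    (∀ (ret : List Char) (o : Nat), (List.foldl stepA (ret, 0, o) l).1 = ret ++ goD l) ∧
    (∀ (ret : List Char) (o : Nat), (List.foldl stepA (ret, 1, o) l).1 = ret ++ goC l) := by
  intro n
  induction n with
  | zero =>
    intro l hl
    have hnil : l = [] := List.eq_nil_of_length_eq_zero (Nat.le_zero.mp hl)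
    subst hnil
    simp [goD_nil, goC_nil]
  | succ n ih =>
    intro l hl
    cases l with
    | nil => simp [goD_nil, goC_nil]
    | cons c rest =>
      have hrest : rest.length ≤ n := by
        simp only [List.length_cons] at hl; omega
      constructor
      · intro ret o
        by_cases hb : c = '\\'
        · subst hb
          cases rest with
          | nil => simp [List.foldl, stepA_bs0, goD_bs_nil]
          | cons d r =>
            have hr : r.length ≤ n := by
              simp only [List.length_cons] at hrest; omega
            simp only [List.foldl]
            rw [stepA_bs0, stepA_esc, (ih r hr).1, goD_bs_cons]
            simp
        · by_cases hbr : c = '['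
          · subst hbr
            simp only [List.foldl]
            rw [stepA_br0, (ih rest hrest).2, goD_br]
            simp
          · simp only [List.foldl]
            rw [stepA_other0 ret o c hbr hb, (ih rest hrest).1, goD_other c rest hb hbr]
            simp
      · intro ret o
        by_cases hb : c = '\\'
        · subst hb
          cases rest with
          | nil => simp [List.foldl, stepA_bs1, goC_bs_nil]
          | cons d r =>
            have hr : r.length ≤ n := by
              simp only [List.length_cons] at hrest; omega
            simp only [List.foldl]
            rw [stepA_bs1, stepA_esc, (ih r hr).2, goC_bs_cons]
            simp
        · by_cases hbr : c = ']'
          · subst hbr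
            simp only [List.foldl]
            rw [stepA_cl1, (ih rest hrest).1, goC_cl]
            simp
          · simp only [List.foldl]
            rw [stepA_other1 ret o c hbr hb, (ih rest hrest).2, goC_other c rest hb hbr]
            simp

-- ===== VERDICT (by name: the statement is the Claim_ definition above) =====
theorem fnpattern_to_re_spec : Claim_equal_fnpattern_to_re := by
  intro pattern _
  unfold Spec_fnpattern_to_re fnpattern_to_re fnpattern_to_re_alt
  simp only []
  rw [(key pattern.toList.length pattern.toList le_rfl).1 [] 0]
  simp
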